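-- pv_equiv track=rewrite | github.com/ttasjwi/algorithm | 문제풀이/온라인 저지/프로그래머스/# 02. Level 2/# 049993. 스킬트리/python/solution.py | solution
-- ===== SOURCE A (Python) =====
-- def solution(skill, skill_trees):
--     skill_set = set(skill) # skill 에 주어진 스킬들을 해싱
--     possible_skill_trees = set(skill[0:i+1] for i in range(len(skill))) # 가능한 skill 조합
--
--     answer = 0
--     for tree in skill_trees:
--         tree = convert(tree, skill_set)
--
--         # tree 가 비어 있거나, tree 가 possible_skill_trees 에 없을 경우
--         if (not tree) or (tree in possible_skill_trees):
--             answer += 1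
--     return answer
--
-- def convert(tree, skill_set):
--     result = []
--     for s in tree:
--         if s in skill_set:
--             result.append(s)
--     return ''.join(result)
-- ===== SOURCE B (Python) =====
-- def solution(skill, skill_trees):
--     skill_set = set(skill)
--     n = len(skill)
--     answer = 0
--     for tree in skill_trees:
--         p = 0
--         ok = True
--         for ch in tree:
--             if ch in skill_set:
--                 if p < n and ch == skill[p]:
--                     p += 1
--                 else:
--                     ok = False
--                     break
--         if ok:
--             answer += 1
--     return answer
-- ===== Notes on version B (the rewrite author's own statement) =====
-- stated objective: faster
-- what changed: Instead of building a set of all prefixes of skill and membership-testing the filtered copy of each tree, B keeps a single index into skill and verifies the prefix-order constraint in one pass over each tree with early exit, building no intermediate strings or prefix set.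
import Mathlib
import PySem

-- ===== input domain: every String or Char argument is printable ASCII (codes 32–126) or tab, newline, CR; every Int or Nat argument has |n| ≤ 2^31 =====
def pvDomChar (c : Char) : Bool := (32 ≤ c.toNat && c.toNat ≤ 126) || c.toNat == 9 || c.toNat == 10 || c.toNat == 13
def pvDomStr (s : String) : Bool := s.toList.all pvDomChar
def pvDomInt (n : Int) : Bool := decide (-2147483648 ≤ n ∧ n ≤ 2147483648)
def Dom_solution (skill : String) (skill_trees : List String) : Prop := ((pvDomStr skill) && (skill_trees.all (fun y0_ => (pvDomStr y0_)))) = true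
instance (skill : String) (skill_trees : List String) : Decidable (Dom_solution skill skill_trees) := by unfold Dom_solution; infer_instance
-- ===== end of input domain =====

-- B re-implements A's prefix-set membership test as a single pointer scan per tree; equivalence proved on all inputs (both are total).

-- ===== PORT A =====
-- convert(tree, skill_set): keep only characters in skill_set (strings ported as List Char)
def pyConvert (tree : List Char) (skillSet : PySem.Set Char) : List Char :=
  tree.foldl (fun r s => if PySem.Set.contains skillSet s then r ++ [s] else r) []

def solution (skill : String) (skill_trees : List String) : Int :=
  let skillSet := PySem.Set.ofList skill.toList
  let possible := PySem.Set.ofList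
    ((PySem.List.pyRange 0 (skill.toList.length : Int) 1).map
      (fun i => PySem.List.slice skill.toList (some 0) (some (i + 1))))
  skill_trees.foldl (fun answer tree =>
    let t := pyConvert tree.toList skillSet
    if t = [] ∨ PySem.Set.contains possible t = true then answer + 1 else answer) 0

-- ===== PORT B =====
-- one step of B's inner loop: state (p, ok); frozen once ok = false (Python's break)
def stepB (l : List Char) (ss : PySem.Set Char) (st : Nat × Bool) (ch : Char) : Nat × Bool :=
  if st.2 then
    if PySem.Set.contains ss ch then
      if h : st.1 < l.length then
        if ch = l[st.1] then (st.1 + 1, true) else (st.1, false)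
      else (st.1, false)
    else st
  else st

def solution_alt (skill : String) (skill_trees : List String) : Int :=
  let l := skill.toList
  let ss := PySem.Set.ofList l
  skill_trees.foldl (fun answer tree =>
    if (tree.toList.foldl (stepB l ss) (0, true)).2 then answer + 1 else answer) 0

-- ===== PRECONDITION & SPEC =====
def Spec_solution (skill : String) (skill_trees : List String) (out : Int) : Prop := out = solution_alt skill skill_trees
instance (skill : String) (skill_trees : List String) (out : Int) : Decidable (Spec_solution skill skill_trees out) := by unfold Spec_solution; infer_instance

-- ===== CLAIM (what is proved, stated in full; the proofs are below) =====
def Claim_equal_solution : Prop := ∀ (skill : String) (skill_trees : List String), Dom_solution skill skill_trees → Spec_solution skill skill_trees (solution skill skill_trees)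

-- ===== LEMMAS AND PROOFS =====

-- convert is a filter
theorem pyConvert_eq_filter (tree : List Char) (ss : PySem.Set Char) :
    pyConvert tree ss = tree.filter (fun c => PySem.Set.contains ss c) := by
  unfold pyConvert
  suffices h : ∀ r : List Char,
      tree.foldl (fun r s => if PySem.Set.contains ss s then r ++ [s] else r) r
        = r ++ tree.filter (fun c => PySem.Set.contains ss c) by
    simpa using h []
  induction tree with
  | nil => simp
  | cons c t ih =>
      intro r
      rw [List.foldl_cons, List.filter_cons]
      by_cases hc : PySem.Set.contains ss c = true
      · rw [if_pos hc, ih, if_pos hc, List.append_assoc]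
        rfl
      · rw [if_neg hc, ih, if_neg hc]

-- A's per-tree condition is exactly "the filtered tree is a prefix of skill"
theorem a_cond_iff (l f : List Char) :
    (f = [] ∨ PySem.Set.contains
        (PySem.Set.ofList ((PySem.List.pyRange 0 (l.length : Int) 1).map
          (fun i => PySem.List.slice l (some 0) (some (i + 1))))) f = true)
      ↔ f <+: l := by
  rw [PySem.Set.contains_iff, PySem.Set.mem_ofList, List.mem_map]
  constructor
  · rintro (rfl | ⟨i, hi, rfl⟩)
    · exact List.nil_prefix
    · rw [PySem.List.mem_pyRange_one] at hi
      obtain ⟨h0, hn⟩ := hi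
      rw [PySem.List.slice_zero_start, PySem.List.slice_to _ (by omega)]
      exact List.take_prefix _ _
  · intro hp
    by_cases hf : f = []
    · exact Or.inl hf
    · right
      have hlen : f.length ≤ l.length := hp.length_le
      have hpos : 0 < f.length := List.length_pos_iff.mpr hf
      refine ⟨(f.length : Int) - 1, ?_, ?_⟩
      · rw [PySem.List.mem_pyRange_one]; omega
      · have h1 : ((f.length : Int) - 1 + 1) = (f.length : Int) := by ring
        rw [h1, PySem.List.slice_zero_start, PySem.List.slice_to _ (by omega)]
        simp only [Int.toNat_natCast]
        exact (List.prefix_iff_eq_take.mp hp).symm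

-- once ok = false the fold stays false
theorem foldB_false (l : List Char) (ss : PySem.Set Char) (chars : List Char) (p : Nat) :
    chars.foldl (stepB l ss) (p, false) = (p, false) := by
  induction chars with
  | nil => rfl
  | cons c t ih => simpa [List.foldl_cons, stepB] using ih

-- B's fold decides "filtered chars form a prefix of l.drop p"
theorem foldB_spec (l : List Char) (ss : PySem.Set Char) (chars : List Char) (p : Nat) :
    ((chars.foldl (stepB l ss) (p, true)).2 = true)
      ↔ (chars.filter (fun c => PySem.Set.contains ss c)) <+: l.drop p := by
  induction chars generalizing p with
  | nil => simp
  | cons c t ih =>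
      rw [List.foldl_cons, List.filter_cons]
      by_cases hc : PySem.Set.contains ss c = true
      · have hc' : c ∈ ss := (PySem.Set.contains_iff ss c).mp hc
        rw [if_pos hc]
        by_cases hlt : p < l.length
        · have hdrop : l.drop p = l[p] :: l.drop (p + 1) := List.drop_eq_getElem_cons hlt
          by_cases heq : c = l[p]
          · have hc2 : l[p] ∈ ss := heq ▸ hc'
            have hstep : stepB l ss (p, true) c = (p + 1, true) := by
              simp [stepB, hlt, heq, hc2]
            rw [hstep, ih, hdrop]
            exact ⟨fun h => List.cons_prefix_cons.mpr ⟨heq, h⟩,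
                   fun h => (List.cons_prefix_cons.mp h).2⟩
          · have hstep : stepB l ss (p, true) c = (p, false) := by
              simp [stepB, hc', hlt, heq]
            rw [hstep, foldB_false, hdrop]
            simp only [Bool.false_eq_true, false_iff]
            intro h
            exact heq (List.cons_prefix_cons.mp h).1
        · have hstep : stepB l ss (p, true) c = (p, false) := by
            simp [stepB, hc', hlt]
          rw [hstep, foldB_false, List.drop_eq_nil_of_le (by omega)]
          simp
      · rw [if_neg hc]
        have hstep : stepB l ss (p, true) c = (p, true) := by
          have hc' : ¬ c ∈ ss := fun h => hc ((PySem.Set.contains_iff ss c).mpr h)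
          simp [stepB, hc']
        rw [hstep, ih]

-- ===== VERDICT (by name: the statement is the Claim_ definition above) =====
theorem solution_spec : Claim_equal_solution := by
  intro skill skill_trees _
  unfold Spec_solution solution solution_alt
  simp only []
  refine PySem.List.foldl_congr_mem _ _ _ _ ?_
  intro acc tree _
  refine if_congr ?_ rfl rfl
  rw [pyConvert_eq_filter, a_cond_iff, foldB_spec]
  simp
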